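-- pv_equiv track=rewrite | github.com/GuiJR777/INE5603-01238A-20201---Programa-o-Orientada-a-Objetos-I | prova/Question_1.py | confere_coluna
-- ===== SOURCE A (Python) =====
-- def confere_coluna(numero, coluna):
--     '''
--         param numero: Recebe valor que esta sob analise
--         param linha: Recebe a lista de valores da coluna que esta sob analise
--         return: Retorna um booleano que indicca se o numero é o maior de sua coluna
--     '''
--     resposta = True
--     for i in coluna:
--         if numero >= int(i) and numero >= 1:
--             pass
--         else:
--             resposta = False
--     return resposta
-- ===== SOURCE B (Python) =====
-- def confere_coluna(numero, coluna):
--     ordenada = sorted(int(i) for i in coluna)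
--     if not ordenada:
--         return True
--     return numero >= 1 and numero >= ordenada[-1]
-- ===== Notes on version B (the rewrite author's own statement) =====
-- stated objective: alternative
-- what changed: Replaces A's per-element boolean-accumulation loop with a sort-then-peek shape: sort the converted column and compare numero only against the last (largest) element, plus an empty-column guard.
import Mathlib
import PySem

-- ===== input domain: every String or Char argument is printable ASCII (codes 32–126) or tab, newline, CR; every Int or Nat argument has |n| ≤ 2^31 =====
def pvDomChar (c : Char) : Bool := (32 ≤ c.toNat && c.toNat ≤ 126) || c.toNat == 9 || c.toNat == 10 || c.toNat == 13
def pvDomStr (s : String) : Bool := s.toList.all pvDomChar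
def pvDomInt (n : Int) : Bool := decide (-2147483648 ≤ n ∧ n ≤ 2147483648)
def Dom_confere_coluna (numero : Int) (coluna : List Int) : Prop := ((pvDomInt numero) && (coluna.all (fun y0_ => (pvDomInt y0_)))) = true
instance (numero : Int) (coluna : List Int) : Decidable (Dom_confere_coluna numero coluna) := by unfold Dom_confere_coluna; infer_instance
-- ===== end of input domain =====

-- B: sort-then-peek — sort the column and compare numero only with the last (largest) element (alternative shape; O(n log n) vs A's O(n) flag loop)

-- ===== PORT A =====
-- A's loop: resposta starts True, set to False whenever the branch condition fails
def confere_coluna (numero : Int) (coluna : List Int) : Bool :=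
  coluna.foldl (fun resposta i => if numero ≥ i ∧ numero ≥ 1 then resposta else false) true

-- ===== PORT B =====
-- ordenada = sorted(coluna); ordenada[-1] is guarded by the emptiness check, so pyGet? returns some; .getD 0 only discharges the option
def confere_coluna_alt (numero : Int) (coluna : List Int) : Bool :=
  let ordenada := PySem.List.sorted coluna (fun x => x) false
  if ordenada = [] then true
  else decide (numero ≥ 1) && decide (numero ≥ (PySem.List.pyGet? ordenada (-1)).getD 0)

-- ===== PRECONDITION & SPEC =====
def Spec_confere_coluna (numero : Int) (coluna : List Int) (out : Bool) : Prop := out = confere_coluna_alt numero coluna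
instance (numero : Int) (coluna : List Int) (out : Bool) : Decidable (Spec_confere_coluna numero coluna out) := by unfold Spec_confere_coluna; infer_instance

-- ===== CLAIM =====
def Claim_equal_confere_coluna : Prop := ∀ (numero : Int) (coluna : List Int), Dom_confere_coluna numero coluna → Spec_confere_coluna numero coluna (confere_coluna numero coluna)

-- ===== LEMMAS AND PROOFS =====

-- A's fold equals acc && "every element satisfies the branch condition"
theorem confA_foldl (numero : Int) (coluna : List Int) (b : Bool) :
    coluna.foldl (fun resposta i => if numero ≥ i ∧ numero ≥ 1 then resposta else false) b
      = (b && coluna.all (fun i => decide (numero ≥ i ∧ numero ≥ 1))) := by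
  induction coluna generalizing b with
  | nil => simp
  | cons x xs ih =>
    simp only [List.foldl_cons, List.all_cons, ih]
    by_cases h : numero ≥ x ∧ numero ≥ 1 <;> simp [h]

-- in a ≤-pairwise list, the last element bounds every element
theorem le_getLast_of_pairwise (l : List Int) (hpw : l.Pairwise (fun a b => a ≤ b))
    (h : l ≠ []) : ∀ x ∈ l, x ≤ l.getLast h := by
  induction l with
  | nil => simp
  | cons a t ih =>
    intro x hx
    cases t with
    | nil => simp at hx; simp [hx]
    | cons b u =>
      rw [List.getLast_cons (by simp)]
      rcases List.mem_cons.mp hx with rfl | hx'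
      · have ha : x ≤ b := (List.pairwise_cons.mp hpw).1 b (by simp)
        have hb : b ≤ (b :: u).getLast (by simp) :=
          ih (List.pairwise_cons.mp hpw).2 (by simp) b (by simp)
        omega
      · exact ih (List.pairwise_cons.mp hpw).2 (by simp) x hx'

-- numero ≥ last of the sorted column ↔ numero ≥ every element of the column
theorem ge_last_sorted_iff (numero : Int) (coluna : List Int)
    (h : PySem.List.sorted coluna (fun x => x) false ≠ []) :
    (numero ≥ (PySem.List.sorted coluna (fun x => x) false).getLast h) ↔
      ∀ i ∈ coluna, numero ≥ i := by
  have hperm : (PySem.List.sorted coluna (fun x => x) false).Perm coluna :=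
    PySem.List.sorted_perm ..
  have hpw : (PySem.List.sorted coluna (fun x => x) false).Pairwise (fun a b => a ≤ b) :=
    PySem.List.sorted_pairwise ..
  constructor
  · intro hle i hi
    have := le_getLast_of_pairwise _ hpw h i (hperm.mem_iff.mpr hi)
    omega
  · intro hall
    exact hall _ (hperm.mem_iff.mp (List.getLast_mem h))

-- ===== VERDICT =====
theorem confere_coluna_spec : Claim_equal_confere_coluna := by
  intro numero coluna _
  unfold Spec_confere_coluna confere_coluna confere_coluna_alt
  rw [confA_foldl]
  simp only [Bool.true_and, PySem.List.pyGet?_neg_one]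
  by_cases hnil : PySem.List.sorted coluna (fun x => x) false = []
  · have hc : coluna = [] := by
      have := (PySem.List.sorted_perm coluna (fun x => x) false).symm
      rw [hnil] at this
      exact this.eq_nil
    simp [hc, PySem.List.sorted_eq_nil_iff]
  · rw [if_neg hnil, List.getLast?_eq_some_getLast hnil, Option.getD_some]
    have hiff := ge_last_sorted_iff numero coluna hnil
    by_cases h1 : numero ≥ 1
    · by_cases hall : ∀ i ∈ coluna, numero ≥ i
      · simp [h1, hiff.mpr hall, List.all_eq_true]
        exact fun x hx => hall x hx
      · have : ¬ numero ≥ (PySem.List.sorted coluna (fun x => x) false).getLast hnil :=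
          fun hc => hall (hiff.mp hc)
        push Not at hall
        obtain ⟨i, hi, hlt⟩ := hall
        simp only [this, decide_false, Bool.and_false, List.all_eq_false]
        exact ⟨i, hi, by simp; omega⟩
    · simp only [h1]
      simp only [decide_false, Bool.false_and, List.all_eq_false]
      have hc : coluna ≠ [] := fun h => hnil (by simp [h, PySem.List.sorted_eq_nil_iff])
      obtain ⟨x, hx⟩ := List.exists_mem_of_ne_nil coluna hc
      exact ⟨x, hx, by simp⟩
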